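-- pv_equiv track=rewrite | github.com/JoseZamora97/fingerprint_minutiae_detection | crop.py | get_crop_indexes
-- ===== SOURCE A (Python) =====
-- def get_crop_indexes(array, t):
--     i_out = j_out = -1
--     for (i, iv), (j, jv) in zip(
--         enumerate(array),
--         list(enumerate(array))[::-1]
--     ):
--         if iv >= t and i_out == -1:
--             i_out = i
--         if jv >= t and j_out == -1:
--             j_out = j
--         if i_out != -1 and j_out != -1:
--             break
--
--     return i_out, j_out
-- ===== SOURCE B (Python) =====
-- def get_crop_indexes(array, t):
--     i_out = next((i for i, v in enumerate(array) if v >= t), -1)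
--     j_out = next((j for j in range(len(array) - 1, -1, -1) if array[j] >= t), -1)
--     return i_out, j_out
-- ===== Notes on version B (the rewrite author's own statement) =====
-- stated objective: simpler
-- what changed: Replaces the single fused loop over zip(enumerate, reversed enumerate) with early-break bookkeeping by two independent directional scans: a forward generator for the first index >= t and a backward range scan for the last index >= t.
import Mathlib
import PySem

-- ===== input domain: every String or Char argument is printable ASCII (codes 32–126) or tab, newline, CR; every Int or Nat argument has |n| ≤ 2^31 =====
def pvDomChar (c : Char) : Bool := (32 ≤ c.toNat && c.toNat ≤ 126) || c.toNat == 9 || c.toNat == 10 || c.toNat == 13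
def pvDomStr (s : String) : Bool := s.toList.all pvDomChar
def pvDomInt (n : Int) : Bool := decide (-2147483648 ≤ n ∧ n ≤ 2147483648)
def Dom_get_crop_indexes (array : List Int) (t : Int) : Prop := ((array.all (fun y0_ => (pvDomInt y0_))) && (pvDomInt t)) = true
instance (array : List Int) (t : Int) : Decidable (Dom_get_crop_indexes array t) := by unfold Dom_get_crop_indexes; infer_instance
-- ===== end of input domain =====

-- B replaces A's fused zip-of-both-directions loop (with early break) by two independent
-- directional scans (forward first-hit, backward first-hit); objective: simpler.

-- ===== PORT A =====
-- the for-loop body over zip(enumerate(array), list(enumerate(array))[::-1]) with the break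
def pvGoA (t : Int) : List ((Int × Int) × (Int × Int)) → Int → Int → Int × Int
  | [], i_out, j_out => (i_out, j_out)
  | ((i, iv), (j, jv)) :: rest, i_out, j_out =>
    let i_out' := if iv ≥ t ∧ i_out = -1 then i else i_out
    let j_out' := if jv ≥ t ∧ j_out = -1 then j else j_out
    if i_out' ≠ -1 ∧ j_out' ≠ -1 then (i_out', j_out') else pvGoA t rest i_out' j_out'

-- list(enumerate(array))[::-1]; step -1 ≠ 0, so slice? is some (getD [] is never taken)
def get_crop_indexes (array : List Int) (t : Int) : Int × Int :=
  pvGoA t ((PySem.List.enumerate array 0).zip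
    ((PySem.List.slice? (PySem.List.enumerate array 0) none none (-1)).getD [])) (-1) (-1)

-- ===== PORT B =====
-- next((i for i, v in enumerate(array) if v >= t), -1)
def pvFirst (t : Int) : List (Int × Int) → Int
  | [] => -1
  | (i, v) :: rest => if v ≥ t then i else pvFirst t rest

-- next((j for j in range(len(array)-1, -1, -1) if array[j] >= t), -1);
-- indices from the range are always in range, so the pyGetD default 0 is never used
def pvBwd (array : List Int) (t : Int) : List Int → Int
  | [] => -1
  | j :: rest => if PySem.List.pyGetD array j 0 ≥ t then j else pvBwd array t rest

def get_crop_indexes_alt (array : List Int) (t : Int) : Int × Int :=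
  (pvFirst t (PySem.List.enumerate array 0),
   pvBwd array t (PySem.List.pyRange ((array.length : Int) - 1) (-1) (-1)))

-- ===== PRECONDITION & SPEC =====
def Spec_get_crop_indexes (array : List Int) (t : Int) (out : Int × Int) : Prop := out = get_crop_indexes_alt array t
instance (array : List Int) (t : Int) (out : Int × Int) : Decidable (Spec_get_crop_indexes array t out) := by unfold Spec_get_crop_indexes; infer_instance

-- ===== CLAIM (what is proved, stated in full; the proofs are below) =====
def Claim_equal_get_crop_indexes : Prop := ∀ (array : List Int) (t : Int), Dom_get_crop_indexes array t → Spec_get_crop_indexes array t (get_crop_indexes array t)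

-- ===== LEMMAS AND PROOFS =====

-- A's fused loop with break computes the two independent first-hit scans, provided the
-- stored indices are never the sentinel -1 and the zipped lists have equal length.
theorem pvGoA_spec (t : Int) : ∀ (xs ys : List (Int × Int)),
    xs.length = ys.length →
    (∀ p ∈ xs, 0 ≤ p.1) → (∀ p ∈ ys, 0 ≤ p.1) →
    ∀ i j : Int, pvGoA t (xs.zip ys) i j =
      ((if i = -1 then pvFirst t xs else i), (if j = -1 then pvFirst t ys else j)) := by
  intro xs
  induction xs with
  | nil =>
    intro ys hlen _ _ i j
    cases ys with
    | nil => simp [pvGoA, pvFirst]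
    | cons c cs => simp at hlen
  | cons a as ih =>
    intro ys hlen hx hy i j
    cases ys with
    | nil => simp at hlen
    | cons c cs =>
      obtain ⟨ai, av⟩ := a
      obtain ⟨ci, cv⟩ := c
      have hai : ¬ ai = -1 := by have := hx (ai, av) (by simp); omega
      have hci : ¬ ci = -1 := by have := hy (ci, cv) (by simp); omega
      have hlen' : as.length = cs.length := by simpa using hlen
      have hx' : ∀ p ∈ as, 0 ≤ p.1 := fun p hp => hx p (List.mem_cons_of_mem _ hp)
      have hy' : ∀ p ∈ cs, 0 ≤ p.1 := fun p hp => hy p (List.mem_cons_of_mem _ hp)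
      simp only [List.zip_cons_cons, pvGoA, pvFirst]
      by_cases hi : i = -1 <;> by_cases hj : j = -1 <;>
        by_cases ha : av ≥ t <;> by_cases hc : cv ≥ t <;>
          simp [hi, hj, ha, hc, hai, hci, ih cs hlen' hx' hy']

-- the backward index scan is the first-hit scan over the looked-up (index, value) pairs
theorem pvBwd_eq_pvFirst_map (array : List Int) (t : Int) : ∀ js : List Int,
    pvBwd array t js = pvFirst t (js.map (fun j => (j, PySem.List.pyGetD array j 0))) := by
  intro js
  induction js with
  | nil => simp [pvBwd, pvFirst]
  | cons j rest ih => simp [pvBwd, pvFirst, ih]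

-- ===== VERDICT (by name: the statement is the Claim_ definition above) =====
theorem get_crop_indexes_spec : Claim_equal_get_crop_indexes := by
  intro array t _
  unfold Spec_get_crop_indexes get_crop_indexes get_crop_indexes_alt
  have henum : PySem.List.enumerate array 0 =
      (PySem.List.pyRange 0 (array.length : Int) 1).map
        (fun j => (j, PySem.List.pyGetD array j 0)) := by
    simpa using PySem.List.enumerate_eq_map_pyRange array 0
  have hrev : PySem.List.slice? (PySem.List.enumerate array 0) none none (-1) =
      some (PySem.List.enumerate array 0).reverse :=
    PySem.List.slice?_none_none_neg_one _
  have hidx : ∀ p ∈ PySem.List.enumerate array 0, 0 ≤ p.1 := by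
    intro p hp
    obtain ⟨k, hk, rfl⟩ := (PySem.List.mem_enumerate_iff _ _ _).1 hp
    simp
  have hmain := pvGoA_spec t (PySem.List.enumerate array 0)
      (PySem.List.enumerate array 0).reverse
      (by simp)
      hidx
      (fun p hp => hidx p (List.mem_reverse.1 hp))
      (-1) (-1)
  have hr : PySem.List.pyRange ((array.length : Int) - 1) (-1) (-1) =
      (PySem.List.pyRange 0 (array.length : Int) 1).reverse := by
    simpa using PySem.List.pyRange_neg_one_eq_reverse ((array.length : Int) - 1) (-1)
  have hbwd : pvBwd array t (PySem.List.pyRange ((array.length : Int) - 1) (-1) (-1)) =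
      pvFirst t (PySem.List.enumerate array 0).reverse := by
    rw [pvBwd_eq_pvFirst_map, hr, henum, List.map_reverse]
  rw [hrev]
  simp only [Option.getD_some, hmain, hbwd]
  simp
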